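-- pv_equiv track=rewrite | github.com/BruinGrowly/Semantic-Compressor | src/ljpw/real_compressor.py | find_primes_sequence
-- ===== SOURCE A (Python) =====
-- from typing import Any, Callable, Dict, List, Optional, Tuple, Union
--
-- def find_primes_sequence(numbers: List[int]) -> Optional[int]:
--     """
--     Find if numbers are first N primes.
--
--     Returns N if found, None otherwise.
--     """
--     def is_prime(n):
--         if n < 2:
--             return False
--         for i in range(2, int(n**0.5) + 1):
--             if n % i == 0:
--                 return False
--         return True
--
--     def get_primes(n):
--         primes = []
--         candidate = 2
--         while len(primes) < n:
--             if is_prime(candidate):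
--                 primes.append(candidate)
--             candidate += 1
--         return primes
--
--     n = len(numbers)
--     expected = get_primes(n)
--     if expected == numbers:
--         return n
--
--     return None
-- ===== SOURCE B (Python) =====
-- def find_primes_sequence(numbers):
--     """
--     Find if numbers are first N primes.
--
--     Returns N if found, None otherwise.
--     """
--     def is_prime(n):
--         if n < 2:
--             return False
--         d = 2
--         while d * d <= n:
--             if n % d == 0:
--                 return False
--             d += 1
--         return True
--
--     candidate = 2
--     for x in numbers:
--         while not is_prime(candidate):
--             candidate += 1
--         if x != candidate:
--             return None
--         candidate += 1
--     return len(numbers)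
-- ===== Notes on version B (the rewrite author's own statement) =====
-- stated objective: faster
-- what changed: A generates the complete list of the first len(numbers) primes and then compares it to the input; B walks the input once in lock-step with an incremental next-prime generator and exits at the first mismatch, so no prime beyond the first mismatch is ever computed.
import Mathlib
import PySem

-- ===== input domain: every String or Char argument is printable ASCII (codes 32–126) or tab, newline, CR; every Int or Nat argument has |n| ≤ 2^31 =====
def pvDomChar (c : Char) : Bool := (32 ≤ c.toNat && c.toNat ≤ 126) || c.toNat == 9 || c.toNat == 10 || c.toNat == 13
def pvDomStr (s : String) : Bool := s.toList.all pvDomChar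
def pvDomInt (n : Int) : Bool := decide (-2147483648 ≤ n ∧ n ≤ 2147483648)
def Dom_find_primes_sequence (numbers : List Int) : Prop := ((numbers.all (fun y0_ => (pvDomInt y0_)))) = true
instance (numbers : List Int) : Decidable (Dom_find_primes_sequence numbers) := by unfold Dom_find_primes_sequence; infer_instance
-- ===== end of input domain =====

-- B replaces A's "generate the full list of the first n primes, then compare" by a single
-- lock-step scan with early exit on the first mismatch (objective: faster on mismatching inputs).


-- ===== PORT A =====
-- A's is_prime: trial division over range(2, int(n**0.5)+1).  The candidate n is a Python int
-- ≥ 0 here, so Nat arithmetic coincides with Python's; int(n**0.5) = Nat.sqrt n (exact for the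
-- machine-feasible candidate sizes this loop ever sees).
def is_primeA (n : Nat) : Bool :=
  if n < 2 then false
  else !((List.range' 2 (Nat.sqrt n + 1 - 2)).any (fun i => n % i == 0))

-- correctness of A's trial division (needed below for the termination of A's while-loop)
theorem is_primeA_iff (n : Nat) : is_primeA n = true ↔ Nat.Prime n := by
  unfold is_primeA
  split
  · rename_i h
    simp only [Bool.false_eq_true, false_iff]
    exact fun hp => absurd hp.two_le (by omega)
  · rename_i h
    have h2 : 2 ≤ n := by omega
    have hs : 1 ≤ Nat.sqrt n := Nat.le_sqrt.2 (by omega)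
    rw [Nat.prime_def_le_sqrt]
    simp only [Bool.not_eq_eq_eq_not, Bool.not_true, List.any_eq_false, List.mem_range'_1,
      beq_iff_eq]
    constructor
    · intro hall
      refine ⟨h2, fun m hm hms hdvd => ?_⟩
      exact hall m ⟨hm, by omega⟩ (Nat.mod_eq_zero_of_dvd hdvd)
    · rintro ⟨-, hall⟩ i ⟨h2i, hi⟩ hmod
      exact hall i h2i (by omega) (Nat.dvd_of_mod_eq_zero hmod)

-- the pool of primes is infinite: measure for the candidate-advancing loops
theorem exists_prime_add (c : Nat) : ∃ k, Nat.Prime (c + k) := by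
  obtain ⟨p, hle, hp⟩ := Nat.exists_infinite_primes c
  exact ⟨p - c, by rwa [Nat.add_sub_cancel' hle]⟩

def pmu (c : Nat) : Nat := Nat.find (exists_prime_add c)

theorem pmu_lt {c : Nat} (h : ¬ Nat.Prime c) : pmu (c + 1) < pmu c := by
  have hspec : Nat.Prime (c + pmu c) := Nat.find_spec (exists_prime_add c)
  have h0 : 0 < pmu c := by
    rcases Nat.eq_zero_or_pos (pmu c) with h0 | h0
    · exfalso
      rw [h0, Nat.add_zero] at hspec
      exact h hspec
    · exact h0
  have hle : pmu (c + 1) ≤ pmu c - 1 :=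
    Nat.find_min' (exists_prime_add (c + 1)) (by
      have : c + 1 + (pmu c - 1) = c + pmu c := by omega
      rwa [this])
  omega

-- A's while loop (builds the list of the first n primes)
def getPrimesGo (n : Nat) (primes : List Int) (c : Nat) : List Int :=
  if primes.length < n then
    if hp : is_primeA c then getPrimesGo n (primes ++ [(c : Int)]) (c + 1)
    else getPrimesGo n primes (c + 1)
  else primes
termination_by (n - primes.length, pmu c)
decreasing_by
  · apply Prod.Lex.left
    simp only [List.length_append, List.length_cons, List.length_nil]
    omega
  · apply Prod.Lex.right
    exact pmu_lt (fun hpr => hp ((is_primeA_iff c).mpr hpr))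

def find_primes_sequence (numbers : List Int) : Option Int :=
  let n := numbers.length
  let expected := getPrimesGo n [] 2
  if expected == numbers then some (n : Int) else none

-- ===== PORT B =====
-- B's is_prime: trial division by d while d*d <= n (no sqrt)
def trialB (n d : Nat) : Bool :=
  if d * d ≤ n then
    if n % d == 0 then false else trialB n (d + 1)
  else true
termination_by n + 1 - d
decreasing_by
  rename_i hdd _
  have : d ≤ n := by
    rcases Nat.eq_zero_or_pos d with h0 | h0
    · omega
    · calc d = d * 1 := (Nat.mul_one d).symm
        _ ≤ d * d := Nat.mul_le_mul_left d h0
        _ ≤ n := hdd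
  omega

def is_primeB (n : Nat) : Bool := if n < 2 then false else trialB n 2

theorem trialB_iff (n d : Nat) :
    trialB n d = true ↔ ∀ e, d ≤ e → e * e ≤ n → ¬ e ∣ n := by
  fun_induction trialB n d with
  | case1 d hdd hmod =>
    simp only [Bool.false_eq_true, false_iff]
    intro hall
    exact hall d (le_refl d) hdd (Nat.dvd_of_mod_eq_zero (by simpa using hmod))
  | case2 d hdd hmod ih =>
    rw [ih]
    constructor
    · intro h e hde hen
      rcases Nat.eq_or_lt_of_le hde with rfl | hlt
      · intro hdvd
        have := Nat.mod_eq_zero_of_dvd hdvd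
        simp_all
      · exact h e hlt hen
    · exact fun h e hde hen => h e (by omega) hen
  | case3 d hdd =>
    simp only [true_iff]
    intro e hde hen
    exact absurd (le_trans (Nat.mul_le_mul hde hde) hen) (by omega)

theorem is_primeB_iff (n : Nat) : is_primeB n = true ↔ Nat.Prime n := by
  unfold is_primeB
  split
  · rename_i h
    simp only [Bool.false_eq_true, false_iff]
    exact fun hp => absurd hp.two_le (by omega)
  · rename_i h
    rw [trialB_iff, Nat.prime_def_le_sqrt]
    constructor
    · exact fun hall => ⟨by omega, fun m hm hms => hall m hm (Nat.le_sqrt.1 hms)⟩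
    · rintro ⟨-, hall⟩
      exact fun e hde hen => hall e hde (Nat.le_sqrt.2 hen)

-- B's inner while loop: advance candidate to the next prime
def nextPrimeB (c : Nat) : Nat :=
  if is_primeB c then c else nextPrimeB (c + 1)
termination_by pmu c
decreasing_by
  rename_i h
  exact pmu_lt (fun hpr => h ((is_primeB_iff c).mpr hpr))

-- B's for loop: compare each element to the next prime, early exit on mismatch
def scanB : List Int → Nat → Bool
  | [], _ => true
  | x :: rest, c =>
    let p := nextPrimeB c
    if x == (p : Int) then scanB rest (p + 1) else false

def find_primes_sequence_alt (numbers : List Int) : Option Int :=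
  if scanB numbers 2 then some (numbers.length : Int) else none

-- ===== PRECONDITION & SPEC =====
def Spec_find_primes_sequence (numbers : List Int) (out : Option Int) : Prop := out = find_primes_sequence_alt numbers
instance (numbers : List Int) (out : Option Int) : Decidable (Spec_find_primes_sequence numbers out) := by unfold Spec_find_primes_sequence; infer_instance

-- ===== CLAIM (what is proved, stated in full; the proofs are below) =====
def Claim_equal_find_primes_sequence : Prop := ∀ (numbers : List Int), Dom_find_primes_sequence numbers → Spec_find_primes_sequence numbers (find_primes_sequence numbers)

-- ===== LEMMAS AND PROOFS =====

theorem primesAB (n : Nat) : is_primeA n = is_primeB n := by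
  have hA := is_primeA_iff n
  have hB := is_primeB_iff n
  cases hA' : is_primeA n <;> cases hB' : is_primeB n <;> simp_all

-- reference list: the k primes starting at the least prime ≥ c
def buildP : Nat → Nat → List Int
  | 0, _ => []
  | k + 1, c => ((nextPrimeB c : Nat) : Int) :: buildP k (nextPrimeB c + 1)

theorem nextPrimeB_pos (c : Nat) (h : is_primeB c = true) : nextPrimeB c = c := by
  rw [nextPrimeB, if_pos h]

theorem nextPrimeB_neg (c : Nat) (h : is_primeB c = false) : nextPrimeB c = nextPrimeB (c + 1) := by
  conv_lhs => rw [nextPrimeB]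
  rw [if_neg (by simp [h])]

theorem getPrimesGo_eq (n : Nat) (primes : List Int) (c : Nat) :
    getPrimesGo n primes c = primes ++ buildP (n - primes.length) c := by
  fun_induction getPrimesGo n primes c with
  | case1 primes c hlen hp ih =>
    rw [ih]
    have hk : n - primes.length = (n - (primes ++ [(c : Int)]).length) + 1 := by
      simp only [List.length_append, List.length_cons, List.length_nil]
      omega
    rw [hk]
    have hc : nextPrimeB c = c := nextPrimeB_pos c (by rw [← primesAB]; exact hp)
    simp [buildP, hc, List.append_assoc]
  | case2 primes c hlen hp ih =>
    rw [ih]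
    have hk : n - primes.length = (n - primes.length - 1) + 1 := by omega
    rw [hk]
    have hc : nextPrimeB c = nextPrimeB (c + 1) :=
      nextPrimeB_neg c (by rw [← primesAB]; simpa using hp)
    simp [buildP, hc]
  | case3 primes c hlen =>
    have : n - primes.length = 0 := by omega
    simp [this, buildP]

theorem scanB_iff (xs : List Int) (c : Nat) :
    scanB xs c = true ↔ buildP xs.length c = xs := by
  induction xs generalizing c with
  | nil => simp [scanB, buildP]
  | cons x rest ih =>
    simp only [scanB, List.length_cons, buildP, beq_iff_eq]
    by_cases hx : x = ((nextPrimeB c : Nat) : Int)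
    · simp [hx, ih]
    · rw [if_neg hx]
      simp only [Bool.false_eq_true, false_iff, List.cons.injEq, not_and]
      intro h
      exact absurd h.symm hx

theorem find_primes_sequence_spec_aux (numbers : List Int) :
    find_primes_sequence numbers = find_primes_sequence_alt numbers := by
  have hb : (buildP numbers.length 2 == numbers) = scanB numbers 2 := by
    rw [Bool.eq_iff_iff, beq_iff_eq, scanB_iff]
  simp only [find_primes_sequence, find_primes_sequence_alt, getPrimesGo_eq,
    List.length_nil, Nat.sub_zero, List.nil_append, hb]

-- ===== VERDICT (by name: the statement is the Claim_ definition above) =====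
theorem find_primes_sequence_spec : Claim_equal_find_primes_sequence := by
  intro numbers _
  unfold Spec_find_primes_sequence
  exact find_primes_sequence_spec_aux numbers
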